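-- pv_equiv track=rewrite | github.com/braingeneers/SpikeLab | src/spikelab/batch_jobs/templating.py | _build_pod_volumes
-- ===== SOURCE A (Python) =====
-- from typing import Any, Dict, List, Optional, Tuple
--
-- def _build_pod_volumes(mounts: List[Dict[str, Any]]) -> List[Dict[str, Any]]:
--     volumes_by_name: Dict[str, Dict[str, Any]] = {}
--     for mount in mounts:
--         name = mount.get("name")
--         if not name:
--             continue
--         secret_name = mount.get("secret_name")
--         pvc_name = mount.get("pvc_name")
--         if name not in volumes_by_name:
--             volumes_by_name[name] = {
--                 "name": name,
--                 "secret_name": secret_name,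
--                 "pvc_name": pvc_name,
--             }
--             continue
--         if not volumes_by_name[name].get("secret_name") and secret_name:
--             volumes_by_name[name]["secret_name"] = secret_name
--         if not volumes_by_name[name].get("pvc_name") and pvc_name:
--             volumes_by_name[name]["pvc_name"] = pvc_name
--     return list(volumes_by_name.values())
-- ===== SOURCE B (Python) =====
-- def _build_pod_volumes(mounts):
--     # Two phases: group mounts by truthy name (first-appearance order), then
--     # reduce each group with a "first truthy, else first value" coalesce.
--     groups = {}
--     for mount in mounts:
--         name = mount.get("name")
--         if not name:
--             continue
--         groups.setdefault(name, []).append(mount)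
--     return [
--         {
--             "name": name,
--             "secret_name": _first_truthy(group, "secret_name"),
--             "pvc_name": _first_truthy(group, "pvc_name"),
--         }
--         for name, group in groups.items()
--     ]
--
-- def _first_truthy(group, key):
--     for mount in group:
--         value = mount.get(key)
--         if value:
--             return value
--     return group[0].get(key)
-- ===== Notes on version B (the rewrite author's own statement) =====
-- stated objective: alternative
-- what changed: Replaces A's interleaved insert/merge updates of the result dict with two separate phases: one grouping pass collecting all mounts per truthy name, then a reduce pass computing each field as the first truthy value in the group (falling back to the first mount's value).
import Mathlib
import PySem

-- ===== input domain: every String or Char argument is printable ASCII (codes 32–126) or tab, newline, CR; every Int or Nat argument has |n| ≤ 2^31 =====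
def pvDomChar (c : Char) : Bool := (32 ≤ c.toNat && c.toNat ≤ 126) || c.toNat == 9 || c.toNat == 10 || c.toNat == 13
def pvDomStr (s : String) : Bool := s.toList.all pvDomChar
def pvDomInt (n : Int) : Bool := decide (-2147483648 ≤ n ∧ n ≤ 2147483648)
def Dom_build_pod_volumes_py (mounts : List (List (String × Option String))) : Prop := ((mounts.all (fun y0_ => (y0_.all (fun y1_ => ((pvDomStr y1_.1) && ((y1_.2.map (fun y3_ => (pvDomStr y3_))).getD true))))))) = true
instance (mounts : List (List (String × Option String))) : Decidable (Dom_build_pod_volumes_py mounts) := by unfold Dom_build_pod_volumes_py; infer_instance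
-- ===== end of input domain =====

-- B replaces A's interleaved insert/merge updates with a grouping pass followed by a
-- separate per-group "first truthy else first value" reduce (objective: alternative decomposition).

-- shared helpers: mount.get(key) (default None) and Python truthiness of an Optional[str]
def pyGetM (m : List (String × Option String)) (k : String) : Option String :=
  (PySem.Dict.mk m).getD k none

def truthyOpt (o : Option String) : Bool :=
  match o with
  | some s => !(s == "")
  | none => false

-- ===== PORT A =====
-- one iteration of A's loop over `mounts`, state = volumes_by_name
def stepA (vbn : PySem.Dict String (List (String × Option String)))
    (mount : List (String × Option String)) : PySem.Dict String (List (String × Option String)) :=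
  match pyGetM mount "name" with
  | none => vbn                                     -- if not name: continue
  | some n =>
    if n = "" then vbn                              -- if not name: continue
    else
      let secret_name := pyGetM mount "secret_name"
      let pvc_name := pyGetM mount "pvc_name"
      if !(vbn.contains n) then
        vbn.insert n [("name", some n), ("secret_name", secret_name), ("pvc_name", pvc_name)]
      else
        let vol := vbn.getD n []
        let vol := if !truthyOpt (pyGetM vol "secret_name") && truthyOpt secret_name
                   then ((PySem.Dict.mk vol).insert "secret_name" secret_name).items else vol
        let vol := if !truthyOpt (pyGetM vol "pvc_name") && truthyOpt pvc_name
                   then ((PySem.Dict.mk vol).insert "pvc_name" pvc_name).items else vol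
        vbn.insert n vol

def build_pod_volumes_py (mounts : List (List (String × Option String))) : List (List (String × Option String)) :=
  (mounts.foldl stepA PySem.Dict.empty).values

-- ===== PORT B =====
-- the scan of _first_truthy's for-loop: first truthy value, if any
def coalesceScan (key : String) : List (List (String × Option String)) → Option (Option String)
  | [] => none
  | m :: rest =>
    let value := pyGetM m key
    if truthyOpt value then some value else coalesceScan key rest

-- _first_truthy(group, key): first truthy value else group[0].get(key) (group is never empty)
def pyCoalesce (group : List (List (String × Option String))) (key : String) : Option String :=
  (coalesceScan key group).getD (match group with
    | m :: _ => pyGetM m key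
    | [] => none)  -- unreachable: Python would raise IndexError on an empty group

-- the reduced volume dict for one group
def reduceVol (n : String) (group : List (List (String × Option String))) : List (String × Option String) :=
  [("name", some n), ("secret_name", pyCoalesce group "secret_name"), ("pvc_name", pyCoalesce group "pvc_name")]

-- one iteration of B's grouping loop: groups.setdefault(name, []).append(mount)
def stepB (g : PySem.Dict String (List (List (String × Option String))))
    (mount : List (String × Option String)) : PySem.Dict String (List (List (String × Option String))) :=
  match pyGetM mount "name" with
  | none => g
  | some n => if n = "" then g else g.modify n [] (· ++ [mount])

def build_pod_volumes_py_alt (mounts : List (List (String × Option String))) : List (List (String × Option String)) :=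
  let groups := mounts.foldl stepB PySem.Dict.empty
  groups.items.map (fun p => reduceVol p.1 p.2)

-- ===== PRECONDITION & SPEC =====
def Spec_build_pod_volumes_py (mounts : List (List (String × Option String))) (out : List (List (String × Option String))) : Prop := out = build_pod_volumes_py_alt mounts
instance (mounts : List (List (String × Option String))) (out : List (List (String × Option String))) : Decidable (Spec_build_pod_volumes_py mounts out) := by unfold Spec_build_pod_volumes_py; infer_instance

-- ===== CLAIM (what is proved, stated in full; the proofs are below) =====
def Claim_equal_build_pod_volumes_py : Prop := ∀ (mounts : List (List (String × Option String))), Dom_build_pod_volumes_py mounts → Spec_build_pod_volumes_py mounts (build_pod_volumes_py mounts)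

-- ===== LEMMAS AND PROOFS =====

-- the per-entry reduce applied to a group entry
def entryF (p : String × List (List (String × Option String))) : String × List (String × Option String) :=
  (p.1, reduceVol p.1 p.2)

-- invariant relating A's state to B's grouping state
def InvAB (g : PySem.Dict String (List (List (String × Option String))))
    (d : PySem.Dict String (List (String × Option String))) : Prop :=
  d = PySem.Dict.mk (g.items.map entryF) ∧ ∀ p ∈ g.items, p.2 ≠ []

theorem mkmap_get? (l : List (String × List (List (String × Option String)))) (n : String) :
    (PySem.Dict.mk (l.map entryF)).get? n = ((PySem.Dict.mk l).get? n).map (reduceVol n) := by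
  induction l with
  | nil => rfl
  | cons p rest ih =>
    rw [List.map_cons]
    rw [PySem.Dict.get?_mk_cons, PySem.Dict.get?_mk_cons]
    by_cases h : p.1 == n
    · have : p.1 = n := by simpa using h
      simp [entryF, this]
    · simp [entryF, h, ih]

theorem coalesce_single (m : List (String × Option String)) (key : String) :
    pyCoalesce [m] key = pyGetM m key := by
  by_cases h : truthyOpt (pyGetM m key) <;> simp [pyCoalesce, coalesceScan, h]

theorem scan_none_head (key : String) (m : List (String × Option String))
    (rest : List (List (String × Option String)))
    (h : coalesceScan key (m :: rest) = none) : truthyOpt (pyGetM m key) = false := by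
  unfold coalesceScan at h
  by_cases ht : truthyOpt (pyGetM m key)
  · simp [ht] at h
  · simpa using ht

theorem scan_append (key : String) (grp : List (List (String × Option String)))
    (m : List (String × Option String)) :
    coalesceScan key (grp ++ [m]) =
      (coalesceScan key grp).orElse (fun _ => if truthyOpt (pyGetM m key) then some (pyGetM m key) else none) := by
  induction grp with
  | nil => simp [coalesceScan]
  | cons m0 rest ih =>
    simp only [List.cons_append, coalesceScan]
    by_cases h : truthyOpt (pyGetM m0 key) <;> simp [h, ih]

theorem scan_some_truthy (key : String) (l : List (List (String × Option String))) (v : Option String)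
    (h : coalesceScan key l = some v) : truthyOpt v = true := by
  induction l with
  | nil => simp [coalesceScan] at h
  | cons a b ih =>
    unfold coalesceScan at h
    by_cases ht : truthyOpt (pyGetM a key)
    · simp [ht] at h; subst h; exact ht
    · simp [ht] at h; exact ih h

theorem coalesce_append (grp : List (List (String × Option String)))
    (m : List (String × Option String)) (key : String) (hne : grp ≠ []) :
    pyCoalesce (grp ++ [m]) key =
      if !truthyOpt (pyCoalesce grp key) && truthyOpt (pyGetM m key)
      then pyGetM m key else pyCoalesce grp key := by
  obtain ⟨m0, rest, rfl⟩ : ∃ m0 rest, grp = m0 :: rest := by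
    cases grp with
    | nil => exact absurd rfl hne
    | cons a b => exact ⟨a, b, rfl⟩
  unfold pyCoalesce
  rw [scan_append]
  cases hs : coalesceScan key (m0 :: rest) with
  | some v =>
    have hv : truthyOpt v = true := scan_some_truthy key (m0 :: rest) v hs
    simp [Option.orElse, hv]
  | none =>
    have h0 : truthyOpt (pyGetM m0 key) = false := scan_none_head key m0 rest hs
    by_cases ht : truthyOpt (pyGetM m key) <;>
      simp [Option.orElse, ht, h0]

theorem getM_reduce_secret (n : String) (grp : List (List (String × Option String))) :
    pyGetM (reduceVol n grp) "secret_name" = pyCoalesce grp "secret_name" := by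
  simp [pyGetM, reduceVol, PySem.Dict.getD_eq_get?_getD, PySem.Dict.get?_mk_cons]

theorem getM_pvc_generic (n : String) (s p : Option String) :
    pyGetM [("name", some n), ("secret_name", s), ("pvc_name", p)] "pvc_name" = p := by
  simp [pyGetM, PySem.Dict.getD_eq_get?_getD, PySem.Dict.get?_mk_cons]

theorem insert_secret_generic (n : String) (s p x : Option String) :
    ((PySem.Dict.mk [("name", some n), ("secret_name", s), ("pvc_name", p)]).insert "secret_name" x).items
      = [("name", some n), ("secret_name", x), ("pvc_name", p)] := by
  simp [PySem.Dict.items_insert, PySem.Dict.contains_mk]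

theorem insert_pvc_generic (n : String) (s p x : Option String) :
    ((PySem.Dict.mk [("name", some n), ("secret_name", s), ("pvc_name", p)]).insert "pvc_name" x).items
      = [("name", some n), ("secret_name", s), ("pvc_name", x)] := by
  simp [PySem.Dict.items_insert, PySem.Dict.contains_mk]

-- the merge branch of A, applied to the reduced volume of a nonempty group,
-- yields the reduced volume of the extended group
theorem merge_eq_reduce (n : String) (grp : List (List (String × Option String)))
    (m : List (String × Option String)) (hne : grp ≠ []) :
    (let vol := reduceVol n grp
     let vol := if !truthyOpt (pyGetM vol "secret_name") && truthyOpt (pyGetM m "secret_name")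
                then ((PySem.Dict.mk vol).insert "secret_name" (pyGetM m "secret_name")).items else vol
     let vol := if !truthyOpt (pyGetM vol "pvc_name") && truthyOpt (pyGetM m "pvc_name")
                then ((PySem.Dict.mk vol).insert "pvc_name" (pyGetM m "pvc_name")).items else vol
     vol) = reduceVol n (grp ++ [m]) := by
  have hs := getM_reduce_secret n grp
  show (let vol := reduceVol n grp; _) = _
  rw [show reduceVol n (grp ++ [m])
        = [("name", some n), ("secret_name", pyCoalesce (grp ++ [m]) "secret_name"),
           ("pvc_name", pyCoalesce (grp ++ [m]) "pvc_name")] from rfl,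
      coalesce_append grp m "secret_name" hne, coalesce_append grp m "pvc_name" hne]
  simp only [reduceVol] at hs ⊢
  rw [hs]
  by_cases h1 : !truthyOpt (pyCoalesce grp "secret_name") && truthyOpt (pyGetM m "secret_name") <;>
    simp only [h1, if_true, if_false, Bool.false_eq_true, insert_secret_generic, getM_pvc_generic] <;>
  · by_cases h2 : !truthyOpt (pyCoalesce grp "pvc_name") && truthyOpt (pyGetM m "pvc_name") <;>
      simp [h2, insert_pvc_generic]

theorem step_inv (g : PySem.Dict String (List (List (String × Option String))))
    (d : PySem.Dict String (List (String × Option String)))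
    (m : List (String × Option String)) (h : InvAB g d) : InvAB (stepB g m) (stepA d m) := by
  obtain ⟨hd, hne⟩ := h
  subst hd
  unfold stepA stepB
  cases hn : pyGetM m "name" with
  | none => exact ⟨rfl, hne⟩
  | some n =>
    by_cases h0 : n = ""
    · simp only [h0, if_true]; exact ⟨rfl, hne⟩
    simp only [h0, if_false]
    have hg : g = PySem.Dict.mk g.items := rfl
    have hcont : (PySem.Dict.mk (g.items.map entryF)).contains n = g.contains n := by
      rw [PySem.Dict.contains_eq_isSome_get?, PySem.Dict.contains_eq_isSome_get?]
      rw [show PySem.Dict.get? g n = (PySem.Dict.mk g.items).get? n from rfl]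
      rw [mkmap_get?]
      cases (PySem.Dict.mk g.items).get? n <;> rfl
    cases hq : PySem.Dict.get? g n with
    | none =>
      -- fresh name: both insert a singleton group / its reduced volume
      have hc : g.contains n = false := by
        rw [PySem.Dict.contains_eq_isSome_get?, hq]; rfl
      rw [hcont, hc]
      simp only [Bool.not_false, if_true]
      have hmod : g.modify n [] (· ++ [m]) = g.insert n (PySem.Dict.getD g n [] ++ [m]) := rfl
      rw [hmod, PySem.Dict.getD_of_not_contains _ _ hc]
      constructor
      · apply PySem.Dict.ext
        rw [PySem.Dict.items_insert_of_not_contains _ _ (by rw [hcont]; exact hc)]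
        rw [show (PySem.Dict.mk ((g.insert n ([] ++ [m])).items.map entryF)).items
              = (g.insert n ([] ++ [m])).items.map entryF from rfl]
        rw [PySem.Dict.items_insert_of_not_contains _ _ hc]
        rw [List.map_append]
        simp [entryF, reduceVol, coalesce_single]
      · intro p hp
        rw [PySem.Dict.items_insert_of_not_contains _ _ hc] at hp
        rcases List.mem_append.mp hp with h | h
        · exact hne p h
        · simp at h; subst h; simp
    | some grp =>
      -- existing name: A merges into the stored volume, B appends to the group
      have hc : g.contains n = true := by
        rw [PySem.Dict.contains_eq_isSome_get?, hq]; rfl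
      have hgrpne : grp ≠ [] := hne (n, grp) (PySem.Dict.mem_items_of_get?_eq_some _ hq)
      rw [hcont, hc]
      simp only [Bool.not_true, if_false, Bool.false_eq_true]
      have hvol : (PySem.Dict.mk (g.items.map entryF)).getD n [] = reduceVol n grp := by
        rw [PySem.Dict.getD_eq_get?_getD, mkmap_get?,
          show (PySem.Dict.mk g.items).get? n = PySem.Dict.get? g n from rfl, hq]
        rfl
      have hmod : g.modify n [] (· ++ [m]) = g.insert n (PySem.Dict.getD g n [] ++ [m]) := rfl
      rw [hmod, PySem.Dict.getD_of_get?_eq_some _ _ hq, hvol]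
      have hm := merge_eq_reduce n grp m hgrpne
      simp only [] at hm
      rw [hm]
      constructor
      · apply PySem.Dict.ext
        rw [PySem.Dict.items_insert_of_contains _ _ (by rw [hcont]; exact hc)]
        rw [show (PySem.Dict.mk ((g.insert n (grp ++ [m])).items.map entryF)).items
              = (g.insert n (grp ++ [m])).items.map entryF from rfl]
        rw [PySem.Dict.items_insert_of_contains _ _ hc]
        rw [List.map_map, List.map_map]
        apply List.map_congr_left
        intro p _
        by_cases hp1 : p.1 = n <;> simp [entryF, hp1]
      · intro p hp
        rw [PySem.Dict.items_insert_of_contains _ _ hc] at hp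
        obtain ⟨q, hq', hpq⟩ := List.mem_map.mp hp
        by_cases hq1 : q.1 == n
        · simp [hq1] at hpq; subst hpq; simp
        · simp [hq1] at hpq; subst hpq; exact hne q hq'

theorem fold_inv (ms : List (List (String × Option String)))
    (g : PySem.Dict String (List (List (String × Option String))))
    (d : PySem.Dict String (List (String × Option String)))
    (h : InvAB g d) : InvAB (ms.foldl stepB g) (ms.foldl stepA d) := by
  induction ms generalizing g d with
  | nil => exact h
  | cons m rest ih => exact ih _ _ (step_inv g d m h)

-- ===== VERDICT (by name: the statement is the Claim_ definition above) =====
theorem build_pod_volumes_py_spec : Claim_equal_build_pod_volumes_py := by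
  intro mounts _
  unfold Spec_build_pod_volumes_py build_pod_volumes_py build_pod_volumes_py_alt
  obtain ⟨hd, _⟩ := fold_inv mounts PySem.Dict.empty PySem.Dict.empty ⟨rfl, by simp [PySem.Dict.empty]⟩
  rw [hd]
  rw [show (PySem.Dict.mk ((mounts.foldl stepB PySem.Dict.empty).items.map entryF)).values
        = ((mounts.foldl stepB PySem.Dict.empty).items.map entryF).map (·.2) from rfl]
  rw [List.map_map]
  rfl
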